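-- pv_equiv track=rewrite | github.com/zacharyhorvitz/ParaGuide | evaluation/automatic_evals/eval_style.py | batch_pairs
-- ===== SOURCE A (Python) =====
-- import math
--
-- def batch_pairs(lists, batch_size=64):
--     lengths = [len(l) for l in lists]
--     assert len(set(lengths)) == 1, lengths
--
--     num_elements = len(lists[0])
--     batches = []
--     idx = 0
--     for i in range(math.ceil(num_elements / batch_size)):
--         max_idx = idx + batch_size
--         batches.append([l[idx:max_idx] for l in lists])
--         idx = max_idx
--     assert sum([len(x[0]) for x in batches]) == num_elements, (
--         sum([len(x[0]) for x in batches]),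
--         num_elements,
--     )
--     return batches
-- ===== SOURCE B (Python) =====
-- def batch_pairs(lists, batch_size=64):
--     lengths = [len(l) for l in lists]
--     assert len(set(lengths)) == 1, lengths
--
--     num_elements = len(lists[0])
--     chunked = [
--         [l[i:i + batch_size] for i in range(0, num_elements, batch_size)]
--         for l in lists
--     ]
--     batches = [list(group) for group in zip(*chunked)]
--     assert sum([len(x[0]) for x in batches]) == num_elements, (
--         sum([len(x[0]) for x in batches]),
--         num_elements,
--     )
--     return batches
-- ===== Notes on version B (the rewrite author's own statement) =====
-- stated objective: alternative
-- what changed: A builds each batch inside one loop that slices every list per step; B instead chunks each list independently into its own list of slices and then transposes (zip) the chunk rows to form the batches.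
-- outside the precondition, e.g. on batch_pairs([], 64): A raises AssertionError, B raises AssertionError
import Mathlib
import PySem

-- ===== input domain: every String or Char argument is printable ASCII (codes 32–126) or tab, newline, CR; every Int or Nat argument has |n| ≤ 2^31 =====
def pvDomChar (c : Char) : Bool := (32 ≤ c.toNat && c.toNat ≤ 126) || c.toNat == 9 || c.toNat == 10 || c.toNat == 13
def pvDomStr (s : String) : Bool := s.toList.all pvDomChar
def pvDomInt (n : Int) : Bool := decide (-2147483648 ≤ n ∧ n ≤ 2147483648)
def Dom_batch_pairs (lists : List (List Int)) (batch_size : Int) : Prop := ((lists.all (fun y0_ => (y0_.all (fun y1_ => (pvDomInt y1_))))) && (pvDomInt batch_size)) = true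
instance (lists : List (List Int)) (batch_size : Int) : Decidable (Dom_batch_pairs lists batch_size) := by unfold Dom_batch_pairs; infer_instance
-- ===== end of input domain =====

-- B changes the decomposition: it chunks each list independently and then transposes
-- (zip) the rows of chunks, instead of A's batch-by-batch loop that slices every list
-- at each step; same output, same asymptotic cost (objective: alternative).

-- ===== PORT A =====
-- The `lengths` assert and the final sum assert do not affect the returned value when
-- they pass; inputs on which they fail (or on which batch_size = 0 raises
-- ZeroDivisionError) are excluded by Pre_batch_pairs below, so `lists[0]` is ported
-- as headD (on [] the first assert fires before lists[0] is reached).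
def batch_pairs (lists : List (List Int)) (batch_size : Int) : List (List (List Int)) :=
  let num_elements : Int := ((lists.headD []).length : Int)
  -- math.ceil(num_elements / batch_size) = -((-num_elements) // batch_size); exact for
  -- the integer magnitudes admitted by Dom (well below 2^53, so no float rounding)
  let nBatches : Int := -(PySem.Int.floordiv (-num_elements) batch_size)
  let st := (PySem.List.pyRange 0 nBatches 1).foldl
    (fun (st : List (List (List Int)) × Int) _ =>
      (st.1 ++ [lists.map (fun l => PySem.List.slice l (some st.2) (some (st.2 + batch_size)))],
        st.2 + batch_size))
    ([], 0)
  st.1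

-- ===== PORT B =====
-- zip(*xss): list of the i-th components, truncated at the shortest row (Python zip)
def zipStar (xss : List (List (List Int))) : List (List (List Int)) :=
  (List.range (((xss.map List.length).min?).getD 0)).map
    (fun i => xss.map (fun xs => xs.getD i []))

def batch_pairs_alt (lists : List (List Int)) (batch_size : Int) : List (List (List Int)) :=
  let num_elements : Int := ((lists.headD []).length : Int)
  let chunked := lists.map (fun l =>
    (PySem.List.pyRange 0 num_elements batch_size).map
      (fun i => PySem.List.slice l (some i) (some (i + batch_size))))
  zipStar chunked

-- ===== PRECONDITION & SPEC =====
-- Pre_ is exactly where the Python A returns: lists nonempty with all lengths equal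
-- (otherwise the first assert fails), and batch_size > 0 (otherwise batch_size = 0
-- raises ZeroDivisionError, and batch_size < 0 makes ceil ≤ 0, so batches = [] and
-- the final sum assert fails — except when the lists are empty, where A returns []).
def Pre_batch_pairs (lists : List (List Int)) (batch_size : Int) : Prop :=
  lists ≠ [] ∧ (∀ l ∈ lists, l.length = (lists.headD []).length) ∧
    (0 < batch_size ∨ ((lists.headD []) = [] ∧ batch_size ≠ 0))
instance (lists : List (List Int)) (batch_size : Int) : Decidable (Pre_batch_pairs lists batch_size) := by unfold Pre_batch_pairs; infer_instance

def pvWitness_batch_pairs : List (List Int) × Int := ([[1, 2, 3], [4, 5, 6]], 2)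

def Spec_batch_pairs (lists : List (List Int)) (batch_size : Int) (out : List (List (List Int))) : Prop := out = batch_pairs_alt lists batch_size
instance (lists : List (List Int)) (batch_size : Int) (out : List (List (List Int))) : Decidable (Spec_batch_pairs lists batch_size out) := by unfold Spec_batch_pairs; infer_instance

-- ===== CLAIM (what is proved, stated in full; the proofs are below) =====
def Claim_equal_batch_pairs : Prop := ∀ (lists : List (List Int)) (batch_size : Int), Dom_batch_pairs lists batch_size → Pre_batch_pairs lists batch_size → Spec_batch_pairs lists batch_size (batch_pairs lists batch_size)

-- ===== LEMMAS AND PROOFS =====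

-- A's loop in closed form: starting from (acc, idx), the accumulated batches are acc
-- followed by one slice-row per iteration, the j-th at offset idx + bs * j.
lemma foldlA_closed (lists : List (List Int)) (bs : Int) :
    ∀ (r : List Int) (acc : List (List (List Int))) (idx : Int),
      (r.foldl
        (fun (st : List (List (List Int)) × Int) _ =>
          (st.1 ++ [lists.map (fun l => PySem.List.slice l (some st.2) (some (st.2 + bs)))], st.2 + bs))
        (acc, idx)).1
      = acc ++ (List.range r.length).map
          (fun (j : Nat) => lists.map (fun l =>
            PySem.List.slice l (some (idx + bs * (j : Int))) (some (idx + bs * (j : Int) + bs)))) := by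
  intro r
  induction r with
  | nil => simp
  | cons x xs ih =>
    intro acc idx
    rw [List.foldl_cons, ih]
    rw [List.length_cons, List.range_succ_eq_map, List.map_cons, List.map_map]
    simp only [Nat.cast_zero, mul_zero, add_zero, List.append_assoc, List.cons_append,
      List.nil_append]
    congr 2
    apply List.map_congr_left
    intro j _
    simp only [Function.comp_apply]
    congr 1
    funext l
    push_cast
    ring_nf

lemma min?_map_const {α : Type} (x : α) (xs : List α) (M : Nat) :
    ((x :: xs).map (fun _ => M)).min? = some M := by
  induction xs with
  | nil => simp
  | cons y ys ih =>
    simp only [List.map_cons, List.min?_cons] at ih ⊢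
    simp_all

-- B's transpose of equal-length chunk rows, in closed form.
lemma zipStar_map_range (h : List Int) (t : List (List Int))
    (g : List Int → Nat → List Int) (M : Nat) :
    zipStar ((h :: t).map (fun l => (List.range M).map (g l)))
      = (List.range M).map (fun i => (h :: t).map (fun l => g l i)) := by
  unfold zipStar
  simp only [List.map_map, Function.comp_def, List.length_map, List.length_range]
  rw [min?_map_const]
  simp only [Option.getD_some]
  apply List.map_congr_left
  intro i hi
  apply List.map_congr_left
  intro l _
  rw [PySem.List.getD_map_range _ _ _ _ (List.mem_range.mp hi)]

lemma ediv_eq_of_bracket (q x b : Int) (hb : 0 < b) (h1 : q * b ≤ x) (h2 : x < (q + 1) * b) :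
    x / b = q := by
  rw [show x = (x - q * b) + q * b by ring, Int.add_mul_ediv_right _ _ (by omega : b ≠ 0),
    Int.ediv_eq_zero_of_lt (by omega) (by nlinarith)]
  ring

-- ===== VERDICT (by name: the statement is the Claim_ definition above) =====
theorem batch_pairs_spec : Claim_equal_batch_pairs := by
  intro lists bs _ hpre
  obtain ⟨hne, _hlen, hbs⟩ := hpre
  obtain ⟨h, t, rfl⟩ : ∃ h t, lists = h :: t := by
    cases lists with
    | nil => exact absurd rfl hne
    | cons h t => exact ⟨h, t, rfl⟩
  simp only [List.headD_cons] at hbs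
  unfold Spec_batch_pairs
  simp only [batch_pairs, batch_pairs_alt, List.headD_cons]
  set n : Int := (h.length : Int) with hn
  have hn0 : 0 ≤ n := by positivity
  by_cases hb : 0 < bs
  · -- batch_size > 0: both sides equal the list of ⌈n / bs⌉ slice-rows
    set q : Int := -(PySem.Int.floordiv (-n) bs) with hq
    have hbr : (q - 1) * bs < n ∧ n ≤ q * bs :=
      (PySem.Int.neg_floordiv_neg_eq_iff_of_pos hb).mp hq.symm
    have hq0 : 0 ≤ q := by nlinarith [hbr.1, hbr.2]
    rw [foldlA_closed (h :: t) bs (PySem.List.pyRange 0 q 1) [] 0]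
    simp only [PySem.List.length_pyRange_one, sub_zero, List.nil_append, zero_add]
    rw [PySem.List.pyRange_of_pos 0 n hb]
    have hM : (if (0:Int) < n then ((n - 0 + bs - 1) / bs).toNat else 0) = q.toNat := by
      rcases lt_or_ge 0 n with hpos | hz
      · rw [if_pos hpos, sub_zero]
        have : (n + bs - 1) / bs = q :=
          ediv_eq_of_bracket _ _ _ hb (by nlinarith [hbr.1]) (by nlinarith [hbr.2])
        rw [this]
      · have hz0 : n = 0 := le_antisymm hz hn0
        have : q = 0 := by nlinarith [hbr.1, hbr.2]
        simp [hz0, this]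
    rw [hM]
    simp only [List.map_map, Function.comp_def]
    rw [zipStar_map_range h t
      (fun l k => PySem.List.slice l (some (0 + bs * (k : Int))) (some (0 + bs * (k : Int) + bs)))
      q.toNat]
    apply List.map_congr_left
    intro i _
    simp [zero_add]
  · -- Pre_ then forces n = 0 and bs < 0: both sides return []
    have hempty : n = 0 := by
      rcases hbs with h' | ⟨h', _⟩
      · exact absurd h' hb
      · simp [hn, h']
    have hbne : bs ≠ 0 := by
      rcases hbs with h' | ⟨_, h'⟩
      · exact absurd h' hb
      · exact h'
    have hA : -(PySem.Int.floordiv (-n) bs) = 0 := by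
      simp [hempty, PySem.Int.floordiv]
    rw [hempty] at *
    rw [hA, PySem.List.pyRange_one_eq_nil le_rfl]
    have hB : PySem.List.pyRange 0 0 bs = [] := by
      simp [PySem.List.pyRange, hbne, hb]
    rw [hB]
    have helim : ∀ (o : Option Nat), o.elim 0 (min 0) = 0 := by
      intro o; cases o <;> simp
    simp [zipStar, helim]
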